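-- pv_equiv track=rewrite | github.com/fermoner/Practica1_prpa2020 | practica1_Buffer.py | indice_min
-- ===== SOURCE A (Python) =====
-- from math import inf
--
-- def indice_min(almacen):
--     indice = None
--     temp = inf
--     for j in range(len(almacen)):
--         if (almacen[j][0]!=-1 and almacen[j][0]!=-2 and almacen[j][0] < temp):
--             indice = j
--             temp = almacen[j][0]
--     return indice
-- ===== SOURCE B (Python) =====
-- def indice_min(almacen):
--     valid = [j for j in range(len(almacen)) if almacen[j][0] != -1 and almacen[j][0] != -2]
--     if not valid:
--         return None
--     return min(valid, key=lambda j: almacen[j][0])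
-- ===== Notes on version B (the rewrite author's own statement) =====
-- stated objective: simpler
-- what changed: Replaces the fused loop that tracks a running (index, inf-initialised minimum) pair with a two-pass decomposition: first a comprehension collecting the valid indices, then a separate min over them keyed by the stored value (no sentinel, no manual state).
import Mathlib
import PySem

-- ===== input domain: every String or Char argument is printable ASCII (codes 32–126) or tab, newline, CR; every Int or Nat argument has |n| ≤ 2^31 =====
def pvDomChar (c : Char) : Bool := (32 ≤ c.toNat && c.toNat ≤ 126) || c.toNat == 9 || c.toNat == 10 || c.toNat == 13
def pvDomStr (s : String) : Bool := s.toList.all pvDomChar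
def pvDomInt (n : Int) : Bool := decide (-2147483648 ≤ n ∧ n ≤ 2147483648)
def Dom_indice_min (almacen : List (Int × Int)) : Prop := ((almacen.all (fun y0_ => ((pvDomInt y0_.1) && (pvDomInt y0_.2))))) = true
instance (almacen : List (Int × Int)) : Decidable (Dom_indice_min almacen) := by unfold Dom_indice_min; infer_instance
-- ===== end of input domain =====

-- B replaces A's fused running-minimum loop (inf sentinel, manual index/value state) by a
-- two-pass decomposition: collect the valid indices, then take the key-minimum of them.

-- ===== PORT A =====
-- almacen[j][0] for j drawn from range(len(almacen)): always in range, default never used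
def pvVal (almacen : List (Int × Int)) (j : Int) : Int := (PySem.List.pyGetD almacen j (0, 0)).1

-- one iteration of A's for-loop; state = (indice, temp) with temp = none meaning inf
def pvStepA (val : Int → Int) (st : Option Int × Option Int) (j : Int) : Option Int × Option Int :=
  match st.2 with
  | none => if val j ≠ -1 ∧ val j ≠ -2 then (some j, some (val j)) else st
  | some t => if val j ≠ -1 ∧ val j ≠ -2 ∧ val j < t then (some j, some (val j)) else st

def indice_min (almacen : List (Int × Int)) : Option Int :=
  ((PySem.List.pyRange 0 (almacen.length : Int) 1).foldl (pvStepA (pvVal almacen)) (none, none)).1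

-- ===== PORT B =====
-- the comprehension's filter condition
def pvPred (val : Int → Int) (j : Int) : Bool := decide (val j ≠ -1 ∧ val j ≠ -2)

def indice_min_alt (almacen : List (Int × Int)) : Option Int :=
  let valid := (PySem.List.pyRange 0 (almacen.length : Int) 1).filter (pvPred (pvVal almacen))
  if valid = [] then none
  else PySem.List.min? valid (pvVal almacen)

-- ===== PRECONDITION & SPEC =====
def Spec_indice_min (almacen : List (Int × Int)) (out : Option Int) : Prop := out = indice_min_alt almacen
instance (almacen : List (Int × Int)) (out : Option Int) : Decidable (Spec_indice_min almacen out) := by unfold Spec_indice_min; infer_instance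

-- ===== CLAIM (what is proved, stated in full; the proofs are below) =====
def Claim_equal_indice_min : Prop := ∀ (almacen : List (Int × Int)), Dom_indice_min almacen → Spec_indice_min almacen (indice_min almacen)

-- ===== LEMMAS AND PROOFS =====
-- min?'s step, named so the fold invariant can mention it
def pvStepM (val : Int → Int) (acc : Option Int) (j : Int) : Option Int :=
  match acc with
  | none => some j
  | some m => if val j < val m then some j else some m

theorem min?_eq_foldl (val : Int → Int) (xs : List Int) :
    PySem.List.min? xs val = xs.foldl (pvStepM val) none := by
  simp only [PySem.List.min?]
  exact List.foldl_ext _ _ none (fun a x _ => by cases a <;> rfl)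

-- invariant: A's fold carries exactly (best, best.map val), and equals B's filter-then-min? fold
theorem fold_encode (val : Int → Int) (L : List Int) (o : Option Int) :
    L.foldl (pvStepA val) (o, o.map val)
      = ((L.filter (pvPred val)).foldl (pvStepM val) o,
         ((L.filter (pvPred val)).foldl (pvStepM val) o).map val) := by
  induction L generalizing o with
  | nil => rfl
  | cons j L ih =>
    simp only [List.foldl_cons, List.filter_cons]
    by_cases hp1 : val j = -1
    · cases o with
      | none => simpa [pvStepA, pvStepM, pvPred, hp1] using ih none
      | some m => simpa [pvStepA, pvStepM, pvPred, hp1] using ih (some m)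
    · by_cases hp2 : val j = -2
      · cases o with
        | none => simpa [pvStepA, pvStepM, pvPred, hp1, hp2] using ih none
        | some m => simpa [pvStepA, pvStepM, pvPred, hp1, hp2] using ih (some m)
      · cases o with
        | none =>
          simpa [pvStepA, pvStepM, pvPred, hp1, hp2] using ih (some j)
        | some m =>
          by_cases hlt : val j < val m
          · simpa [pvStepA, pvStepM, pvPred, hp1, hp2, hlt] using ih (some j)
          · simpa [pvStepA, pvStepM, pvPred, hp1, hp2, hlt] using ih (some m)

-- ===== VERDICT (by name: the statement is the Claim_ definition above) =====
theorem alt_unfold (almacen : List (Int × Int)) : indice_min_alt almacen =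
    (if (PySem.List.pyRange 0 (almacen.length : Int) 1).filter (pvPred (pvVal almacen)) = [] then none
     else PySem.List.min? ((PySem.List.pyRange 0 (almacen.length : Int) 1).filter (pvPred (pvVal almacen)))
            (pvVal almacen)) := rfl

theorem indice_min_spec : Claim_equal_indice_min := by
  intro almacen _
  have h := fold_encode (pvVal almacen) (PySem.List.pyRange 0 (almacen.length : Int) 1) none
  simp only [Option.map_none] at h
  show indice_min almacen = indice_min_alt almacen
  rw [alt_unfold]
  unfold indice_min
  rw [h]
  by_cases hnil : (PySem.List.pyRange 0 (almacen.length : Int) 1).filter (pvPred (pvVal almacen)) = []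
  · rw [if_pos hnil, hnil]; rfl
  · rw [if_neg hnil, min?_eq_foldl]
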